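-- pv_equiv track=rewrite | github.com/ivi982010/SySdL-TPs | Lexer.py | a_re5
-- ===== SOURCE A (Python) =====
-- def a_re5 (tokens, acu):
--     s = 0
--     for c in acu:
--         if s == 0 and c == 'f':
--             s = 1
--         elif s == 1 and c == 'o':
--             s = 2
--         elif s == 2 and c == 'r':
--             s = 3
--         else:
--             s = -1
--             break
--     if s == 3:
--         tokens.append(("<Reservada>", acu))
--     return (s == 3)
-- ===== SOURCE B (Python) =====
-- def a_re5(tokens, acu):
--     # Closed-form: the state machine in A just checks acu == 'for'.
--     result = (acu == 'for')
--     if result: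
--         tokens.append(("<Reservada>", acu))
--     return result
-- ===== Notes on version B (the rewrite author's own statement) =====
-- stated objective: simpler
-- what changed: Replaced the per-character three-state automaton (with break) by a direct closed-form string equality acu == 'for'.
import Mathlib
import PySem

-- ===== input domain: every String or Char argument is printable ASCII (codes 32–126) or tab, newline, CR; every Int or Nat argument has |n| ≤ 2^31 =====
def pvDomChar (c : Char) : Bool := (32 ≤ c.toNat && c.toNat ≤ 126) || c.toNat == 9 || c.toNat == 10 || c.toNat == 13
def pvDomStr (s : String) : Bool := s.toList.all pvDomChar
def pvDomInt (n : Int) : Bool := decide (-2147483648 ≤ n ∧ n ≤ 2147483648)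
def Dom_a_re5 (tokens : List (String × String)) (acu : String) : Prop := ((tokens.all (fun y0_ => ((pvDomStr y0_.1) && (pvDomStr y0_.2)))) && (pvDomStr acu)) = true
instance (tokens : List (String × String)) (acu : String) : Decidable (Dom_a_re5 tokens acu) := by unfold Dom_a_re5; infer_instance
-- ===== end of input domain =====

-- B replaces A's per-character three-state automaton by the closed-form check acu = "for" (simpler).
-- A mutates `tokens` (append) when it returns True; B performs the identical mutation; the theorem is about the return value.

-- ===== PORT A =====
-- the for-loop with break, step for step: recursion over the remaining characters carrying state s
def a_re5_loop (s : Int) (cs : List Char) : Int :=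
  match cs with
  | [] => s
  | c :: rest =>
    if s == 0 && c == 'f' then a_re5_loop 1 rest
    else if s == 1 && c == 'o' then a_re5_loop 2 rest
    else if s == 2 && c == 'r' then a_re5_loop 3 rest
    else (-1 : Int)   -- break

def a_re5 (tokens : List (String × String)) (acu : String) : Bool :=
  a_re5_loop 0 acu.toList == 3

-- ===== PORT B =====
def a_re5_alt (tokens : List (String × String)) (acu : String) : Bool :=
  acu == "for"

-- ===== PRECONDITION & SPEC =====
def Spec_a_re5 (tokens : List (String × String)) (acu : String) (out : Bool) : Prop := out = a_re5_alt tokens acu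
instance (tokens : List (String × String)) (acu : String) (out : Bool) : Decidable (Spec_a_re5 tokens acu out) := by unfold Spec_a_re5; infer_instance

-- ===== CLAIM (what is proved, stated in full; the proofs are below) =====
def Claim_equal_a_re5 : Prop := ∀ (tokens : List (String × String)) (acu : String), Dom_a_re5 tokens acu → Spec_a_re5 tokens acu (a_re5 tokens acu)

-- ===== LEMMAS AND PROOFS =====

theorem a_re5_loop_char : ∀ (l : List Char), (a_re5_loop 0 l == 3) = (l = ['f','o','r'] : Bool) := by
  intro l
  rcases l with _ | ⟨a, _ | ⟨b, _ | ⟨c, _ | ⟨d, t⟩⟩⟩⟩ <;>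
    simp [a_re5_loop] <;> split_ifs <;> simp_all

-- ===== VERDICT (by name: the statement is the Claim_ definition above) =====
theorem a_re5_spec : Claim_equal_a_re5 := by
  intro tokens acu _
  unfold Spec_a_re5 a_re5 a_re5_alt
  rw [a_re5_loop_char]
  have h : (acu = "for") ↔ (acu.toList = ['f','o','r']) := by
    constructor
    · intro h; subst h; rfl
    · intro h; exact String.toList_inj.mp (by simpa using h)
  by_cases hc : acu = "for"
  · simp [hc]
  · have hl : acu.toList ≠ ['f', 'o', 'r'] := fun hl => hc (h.mpr hl)
    simp [hc, hl]
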